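-- pv_equiv track=rewrite | github.com/kxmpxtxnt/adventofcode-25 | Day-06/python/paul2708/day06.py | split_numbers
-- ===== SOURCE A (Python) =====
-- from typing import List
--
-- def split_numbers(line: str, max_lengths: List[int]) -> List[str]:
--     numbers = []
--     curr = ""
--
--     for i in range(len(line)):
--         if len(curr) < max_lengths[len(numbers)]:
--             curr += line[i]
--         else:
--             numbers.append(curr)
--             curr = ""
--
--     numbers.append(curr)
--     return numbers
-- ===== SOURCE B (Python) =====
-- from typing import List
--
-- def split_numbers(line: str, max_lengths: List[int]) -> List[str]:
--     numbers = []
--     pos = 0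
--     while pos < len(line):
--         target = max_lengths[len(numbers)]
--         numbers.append(line[pos:pos + target])
--         pos += target + 1  # the chunk plus the delimiter character after it
--     if pos <= len(line):
--         # the line ended right on a delimiter (or was empty): trailing empty chunk
--         numbers.append("")
--     return numbers
-- ===== Notes on version B (the rewrite author's own statement) =====
-- stated objective: simpler
-- what changed: Replaces A's per-character scan with a growing accumulator string by a chunk-jumping while loop that slices each chunk out at once and advances past the dropped delimiter; Pre_ excludes lines longer than the total capacity (A raises IndexError) and inputs whose line actually reaches a negative maximum length, a nonsense corner where A's empty-chunk-and-consume value is accidental and B's backwards slice arithmetic usually raises IndexError.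
-- outside the precondition, e.g. on split_numbers('a', [-1]): A returns ['', ''], B raises IndexError
import Mathlib
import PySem

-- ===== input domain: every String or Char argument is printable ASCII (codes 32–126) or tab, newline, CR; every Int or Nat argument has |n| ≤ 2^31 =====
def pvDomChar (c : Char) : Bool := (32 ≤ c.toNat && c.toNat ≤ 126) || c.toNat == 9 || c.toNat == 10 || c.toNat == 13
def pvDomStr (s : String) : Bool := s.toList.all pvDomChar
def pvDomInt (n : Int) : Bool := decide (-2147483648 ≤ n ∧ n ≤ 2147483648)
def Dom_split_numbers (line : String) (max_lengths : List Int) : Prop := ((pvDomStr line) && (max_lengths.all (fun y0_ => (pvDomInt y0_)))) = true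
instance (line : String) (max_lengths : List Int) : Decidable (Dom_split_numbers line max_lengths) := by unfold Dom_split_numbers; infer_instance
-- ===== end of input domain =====

-- B replaces A's per-character scan with a chunk-jumping while loop that slices each chunk out at once (simpler decomposition).


-- ===== PORT A =====
-- A's loop over range(len(line)) with state (numbers, curr); curr is carried as List Char
-- (curr += line[i] becomes c ++ [ch]).  max_lengths[len(numbers)] is PySem.List.pyGet?;
-- none = Python's IndexError, so the loop returns Option (excluded by Pre_).
def splitA (ml : List Int) : List Char → List String → List Char → Option (List String × List Char)
  | [], ns, c => some (ns, c)
  | ch :: rest, ns, c =>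
    match PySem.List.pyGet? ml (ns.length : Int) with
    | none => none
    | some t =>
      if (c.length : Int) < t then splitA ml rest ns (c ++ [ch])
      else splitA ml rest (ns ++ [String.ofList c]) []

def split_numbers (line : String) (max_lengths : List Int) : List String :=
  match splitA max_lengths line.toList [] [] with
  | some (ns, c) => ns ++ [String.ofList c]
  | none => []   -- unreachable under Pre_ (Python raises IndexError there)

-- ===== PORT B =====
-- B's 'while pos < len(line)' loop with the post-loop trailing-empty append folded into the
-- exit branch.  max_lengths[len(numbers)] is pyGet? (none = IndexError, excluded by Pre_);
-- line[pos:pos+target] is PySem.List.slice.  Fuel makes the while loop total and is never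
-- exhausted: numbers grows by one per iteration and the indexing fails once it reaches
-- len(max_lengths), so the Python loop runs at most len(max_lengths) + 1 times.
def loopB (lineL : List Char) (ml : List Int) : Nat → Int → List String → Option (List String)
  | 0, _, _ => none                                    -- fuel exhausted: Python diverges here
  | fuel + 1, pos, ns =>
    if pos < (lineL.length : Int) then
      match PySem.List.pyGet? ml (ns.length : Int) with
      | none => none                                   -- IndexError
      | some target =>
        loopB lineL ml fuel (pos + target + 1)
          (ns ++ [String.ofList (PySem.List.slice lineL (some pos) (some (pos + target)))])
    else if pos ≤ (lineL.length : Int) then some (ns ++ [""]) else some ns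

def split_numbers_alt (line : String) (max_lengths : List Int) : List String :=
  (loopB line.toList max_lengths (max_lengths.length + 1) 0 []).getD []

-- ===== PRECONDITION & SPEC =====
-- capacity: chunk k consumes t_k characters plus one dropped delimiter
def pvCap (ml : List Int) : Nat := (ml.map (fun t => t.toNat + 1)).sum

-- Pre_ excludes lines longer than the total capacity (A raises IndexError there) and
-- inputs whose line actually reaches a NEGATIVE maximum length, a nonsense corner where
-- A's value (an empty chunk while a character is silently consumed) is accidental and B's
-- slice arithmetic walks backwards (usually ending in IndexError).
def Pre_split_numbers (line : String) (max_lengths : List Int) : Prop :=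
  line.toList.length ≤ pvCap max_lengths ∧
  ∀ k < max_lengths.length, max_lengths.getD k 0 < 0 →
    line.toList.length ≤ pvCap (max_lengths.take k)
instance (line : String) (max_lengths : List Int) : Decidable (Pre_split_numbers line max_lengths) := by unfold Pre_split_numbers; infer_instance

def pvWitness_split_numbers : String × List Int := ("123 45", [3, 2])

def Spec_split_numbers (line : String) (max_lengths : List Int) (out : List String) : Prop := out = split_numbers_alt line max_lengths
instance (line : String) (max_lengths : List Int) (out : List String) : Decidable (Spec_split_numbers line max_lengths out) := by unfold Spec_split_numbers; infer_instance

-- ===== CLAIM (what is proved, stated in full; the proofs are below) =====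
def Claim_equal_split_numbers : Prop := ∀ (line : String) (max_lengths : List Int), Dom_split_numbers line max_lengths → Pre_split_numbers line max_lengths → Spec_split_numbers line max_lengths (split_numbers line max_lengths)

-- ===== LEMMAS AND PROOFS =====

-- the index A uses is len(numbers); with ml = pref ++ t :: tl and |ns| = |pref| it reads t
lemma pyGet_mid (pref tl : List Int) (t : Int) :
    PySem.List.pyGet? (pref ++ t :: tl) (pref.length : Int) = some t := by
  simp [PySem.List.pyGet?, PySem.List.pyIdx?]

-- fill phase of A: with current target t ≥ 0 and partial chunk c, either the line runs out
-- while filling, or the chunk fills, the next char is dropped and the loop continues.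
lemma splitA_fill (ml : List Int) (t : Int) (ht : 0 ≤ t) :
    ∀ (rest c : List Char) (ns : List String),
    PySem.List.pyGet? ml (ns.length : Int) = some t →
    c.length ≤ t.toNat →
    splitA ml rest ns c =
      if rest.length + c.length ≤ t.toNat then some (ns, c ++ rest)
      else splitA ml (rest.drop (t.toNat - c.length + 1))
             (ns ++ [String.ofList (c ++ rest.take (t.toNat - c.length))]) [] := by
  intro rest
  induction rest with
  | nil =>
    intro c ns hget hc
    rw [if_pos (by simpa using hc)]
    simp [splitA]
  | cons ch rs ih =>
    intro c ns hget hc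
    by_cases hlt : (c.length : Int) < t
    · have hlt' : c.length < t.toNat := by omega
      rw [splitA, hget]
      simp only [hlt, if_pos]
      rw [ih (c ++ [ch]) ns hget (by simp; omega)]
      by_cases hfit : rs.length + (c.length + 1) ≤ t.toNat
      · rw [if_pos (by simp; omega), if_pos (by simp; omega)]
        simp
      · rw [if_neg (by simp; omega), if_neg (by simp; omega)]
        have hk : t.toNat - c.length = (t.toNat - (c.length + 1)) + 1 := by omega
        rw [hk]
        simp [List.take_succ_cons, List.drop_succ_cons]
    · have hceq : c.length = t.toNat := by omega
      rw [splitA, hget]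
      simp only [hlt, if_false]
      rw [if_neg (by simp; omega)]
      have h0 : t.toNat - c.length = 0 := by omega
      simp [h0]

-- main invariant: with ml = pref ++ tl, |ns| = |pref|, position p ≤ L, enough capacity in
-- tl for the remaining characters and no reachable negative target in tl, B's while loop
-- computes exactly A's loop (assembled with the final append).
lemma loopB_eq_splitA (lineL : List Char) (tl : List Int) :
    ∀ (pref : List Int) (p : Nat) (ns : List String) (fuel : Nat),
    ns.length = pref.length →
    p ≤ lineL.length →
    lineL.length - p ≤ pvCap tl →
    (∀ k < tl.length, tl.getD k 0 < 0 → lineL.length - p ≤ pvCap (tl.take k)) →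
    tl.length + 1 ≤ fuel →
    loopB lineL (pref ++ tl) fuel (p : Int) ns =
      some (match splitA (pref ++ tl) (lineL.drop p) ns [] with
            | some (ns', c) => ns' ++ [String.ofList c]
            | none => []) := by
  induction tl with
  | nil =>
    intro pref p ns fuel hlen hple hcap _ hfuel
    have hp : p = lineL.length := by simp [pvCap] at hcap; omega
    obtain ⟨f, rfl⟩ : ∃ f, fuel = f + 1 := ⟨fuel - 1, by omega⟩
    rw [loopB]
    rw [if_neg (by omega), if_pos (by omega)]
    simp [hp, splitA]
  | cons t tl' ih =>
    intro pref p ns fuel hlen hple hcap hneg hfuel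
    simp only [List.length_cons] at hfuel
    obtain ⟨f, rfl⟩ : ∃ f, fuel = f + 1 := ⟨fuel - 1, by omega⟩
    by_cases hend : p = lineL.length
    · rw [loopB, if_neg (by omega), if_pos (by omega)]
      simp [hend, splitA]
    · have hplt : p < lineL.length := by omega
      -- a negative target here would be reached: excluded by hneg at k = 0
      have ht : 0 ≤ t := by
        by_contra hlt
        have := hneg 0 (by simp) (by simpa using (by omega : t < 0))
        simp [pvCap] at this
        omega
      have hget : PySem.List.pyGet? (pref ++ t :: tl') (ns.length : Int) = some t := by
        rw [hlen]; exact pyGet_mid pref tl' t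
      rw [loopB, if_pos (by exact_mod_cast hplt), hget]
      have hslice : PySem.List.slice lineL (some (p : Int)) (some ((p : Int) + t)) =
          (lineL.drop p).take t.toNat := by
        rw [PySem.List.slice_toNat lineL (by omega) (by omega)]
        congr 1
        omega
      rw [splitA_fill (pref ++ t :: tl') t ht (lineL.drop p) [] ns hget (by simp)]
      simp only [List.length_nil, Nat.add_zero, Nat.sub_zero, List.nil_append, List.length_drop]
      by_cases hfit : lineL.length - p ≤ t.toNat
      · -- line runs out inside (or exactly at the end of) this chunk: both loops stop
        rw [if_pos hfit]
        have htk : (lineL.drop p).take t.toNat = lineL.drop p :=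
          List.take_of_length_le (by simp [List.length_drop]; omega)
        have ht' : ((t.toNat : Int)) = t := Int.toNat_of_nonneg ht
        have hover : ¬ ((p : Int) + t + 1 < (lineL.length : Int)) := by omega
        have hover2 : ¬ ((p : Int) + t + 1 ≤ (lineL.length : Int)) := by omega
        obtain ⟨g, rfl⟩ : ∃ g, f = g + 1 := ⟨f - 1, by omega⟩
        rw [loopB, if_neg hover, if_neg hover2]
        simp [hslice, htk]
      · -- chunk fills and the delimiter exists: advance past it and use the IH
        rw [if_neg hfit]
        have hstep : ((p : Int) + t + 1) = ((p + t.toNat + 1 : Nat) : Int) := by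
          push_cast; omega
        rw [hstep]
        have hcap' : lineL.length - (p + t.toNat + 1) ≤ pvCap tl' := by
          simp [pvCap] at hcap ⊢; omega
        have hneg' : ∀ k < tl'.length, tl'.getD k 0 < 0 →
            lineL.length - (p + t.toNat + 1) ≤ pvCap (tl'.take k) := by
          intro k hk hkneg
          have := hneg (k + 1) (by simp; omega) (by simpa using hkneg)
          simp [pvCap] at this ⊢
          omega
        have := ih (pref ++ [t]) (p + t.toNat + 1)
          (ns ++ [String.ofList ((lineL.drop p).take t.toNat)]) f
          (by simp [hlen]) (by omega) hcap' hneg' (by omega)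
        rw [List.append_assoc] at this
        simp only [List.cons_append, List.nil_append] at this
        have hd : (lineL.drop p).drop (t.toNat + 1) = lineL.drop (p + t.toNat + 1) := by
          rw [List.drop_drop, ← Nat.add_assoc]
        rw [hslice, hd, this]

-- ===== VERDICT (by name: the statement is the Claim_ definition above) =====
theorem split_numbers_spec : Claim_equal_split_numbers := by
  intro line ml _ hpre
  unfold Spec_split_numbers split_numbers split_numbers_alt
  have := loopB_eq_splitA line.toList ml [] 0 [] (ml.length + 1) rfl
    (by omega) (by simpa using hpre.1) (by simpa using hpre.2) (by omega)
  simp only [List.nil_append, Nat.cast_zero, List.drop_zero] at this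
  rw [this]
  rfl
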